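-- pv_equiv track=rewrite | github.com/Aniket762/Project-alpha | PYTHON/minimumCoin.py | coinExchange
-- ===== SOURCE A (Python) =====
-- def coinExchange(c, m):
--     coins_list = []     # Output list used to store the value of selected coins
--     index = len(c)
--
--     c.sort() # Sort values of list C in ascending order
--
--     while(index):
--         future_sum = sum(coins_list) + c[index - 1]     # Calculate the sum of the values of already selected coins plus the value that going to be added
--
--         if (m > c[index - 1]) and (future_sum <= m):
--             coins_list.append(c[index - 1])
--         else:
--             index -= 1
--
--     return len(coins_list)
-- ===== SOURCE B (Python) =====
-- def coinExchange(c, m):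
--     # Largest-first greedy; adds all copies of each coin value at once via division.
--     # Note: unlike A, B does not sort c in place (return value is identical).
--     s = 0
--     count = 0
--     for v in sorted(c, reverse=True):
--         if 0 < v < m:
--             k = (m - s) // v
--             if k > 0:
--                 count += k
--                 s += k * v
--     return count
-- ===== Notes on version B (the rewrite author's own statement) =====
-- stated objective: faster
-- what changed: A appends one coin per loop iteration (recomputing sum(coins_list) each time) until the limit is hit; B makes a single descending pass keeping a running sum and adds all copies of each coin value at once with floor division. Intended as faster: a timing run saw A time out at sizes where B returned, so no ratio could be measured.
import Mathlib
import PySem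

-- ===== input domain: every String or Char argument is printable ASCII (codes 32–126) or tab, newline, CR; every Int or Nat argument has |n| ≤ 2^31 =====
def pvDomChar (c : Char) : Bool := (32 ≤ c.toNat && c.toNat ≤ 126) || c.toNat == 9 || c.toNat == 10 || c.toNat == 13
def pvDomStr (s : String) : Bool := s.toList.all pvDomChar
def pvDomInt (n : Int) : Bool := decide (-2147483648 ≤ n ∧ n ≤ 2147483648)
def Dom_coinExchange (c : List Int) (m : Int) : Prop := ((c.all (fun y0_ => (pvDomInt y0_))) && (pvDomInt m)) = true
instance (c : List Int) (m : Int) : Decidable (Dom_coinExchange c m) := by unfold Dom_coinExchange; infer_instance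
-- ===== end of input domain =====

-- B replaces A's one-append-per-coin greedy loop by a single descending pass that adds all
-- copies of each coin value at once via floor division (intended as faster; a timing run
-- saw A time out at sizes where B returned, so no ratio could be measured).
-- A sorts its argument list in place; B does not — the equivalence proved is about the return value.

-- ===== PORT A =====
-- A's while loop: 'index' counts down only in the else branch; fuel bounds the iterations
-- (inside Pre_ each append raises the running sum by at least 1, so fuel is sufficient).
def coinExchangeLoop (c : List Int) (m : Int) : Nat → Nat → List Int → List Int
  | 0, _, cl => cl
  | fuel+1, idx, cl =>
    if idx = 0 then cl
    else
      let v := (PySem.List.pyGet? c ((idx : Int) - 1)).getD 0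
      if m > v ∧ cl.sum + v ≤ m then
        coinExchangeLoop c m fuel idx (cl ++ [v])
      else
        coinExchangeLoop c m fuel (idx - 1) cl

def coinExchange (c : List Int) (m : Int) : Int :=
  let cs := PySem.List.sorted c (fun x => x) false
  ((coinExchangeLoop cs m (c.length + m.toNat + 1) c.length []).length : Int)

-- ===== PORT B =====
def coinStep (m : Int) (p : Int × Int) (v : Int) : Int × Int :=
  if 0 < v ∧ v < m then
    let k := PySem.Int.floordiv (m - p.1) v
    if 0 < k then (p.1 + k * v, p.2 + k) else p
  else p

def coinExchange_alt (c : List Int) (m : Int) : Int :=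
  ((PySem.List.sorted c (fun x => x) true).foldl (coinStep m) (0, 0)).2

-- ===== PRECONDITION & SPEC =====
-- Pre_ is exactly A's termination region: A's while loop runs forever as soon as some coin
-- value x satisfies x < m without 0 < x (the append condition then holds unboundedly).
def Pre_coinExchange (c : List Int) (m : Int) : Prop := ∀ x ∈ c, x < m → 0 < x
instance (c : List Int) (m : Int) : Decidable (Pre_coinExchange c m) := by unfold Pre_coinExchange; infer_instance
def pvWitness_coinExchange : List Int × Int := ([1, 5, 2, 2], 11)

def Spec_coinExchange (c : List Int) (m : Int) (out : Int) : Prop := out = coinExchange_alt c m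
instance (c : List Int) (m : Int) (out : Int) : Decidable (Spec_coinExchange c m out) := by unfold Spec_coinExchange; infer_instance

-- ===== CLAIM (what is proved, stated in full; the proofs are below) =====
def Claim_equal_coinExchange : Prop := ∀ (c : List Int) (m : Int), Dom_coinExchange c m → Pre_coinExchange c m → Spec_coinExchange c m (coinExchange c m)

-- ===== LEMMAS AND PROOFS =====

-- One append of coin v in A is absorbed by B's division step.
lemma coinStep_absorb (m s L v : Int) (hv : 0 < v) (hvm : v < m) (hle : s + v ≤ m) :
    coinStep m (s, L) v = coinStep m (s + v, L + 1) v := by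
  have hfd : ∀ a : Int, PySem.Int.floordiv a v = a / v :=
    fun a => PySem.Int.floordiv_eq_ediv_of_pos hv
  have hne : v ≠ 0 := by omega
  have h1 : (m - (s + v)) / v = (m - s) / v - 1 := by
    have h := Int.add_mul_ediv_right (m - (s + v)) 1 hne
    have h2 : m - (s + v) + 1 * v = m - s := by ring
    rw [h2] at h; omega
  have hk1 : 1 ≤ (m - s) / v := by
    rw [Int.le_ediv_iff_mul_le hv]; omega
  simp only [coinStep, hfd, h1]
  rw [if_pos (show 0 < v ∧ v < m from ⟨hv, hvm⟩), if_pos (show 0 < v ∧ v < m from ⟨hv, hvm⟩),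
    if_pos (show (0:Int) < (m - s) / v by omega)]
  by_cases hk : 0 < (m - s) / v - 1
  · rw [if_pos hk, Prod.mk.injEq]; constructor <;> ring
  · rw [if_neg hk]
    have h3 : (m - s) / v = 1 := by omega
    rw [h3, Prod.mk.injEq]; constructor <;> ring

-- Skipped coin: B's step is the identity when A's append condition fails.
lemma coinStep_skip (m s L v : Int) (h : ¬ (m > v ∧ s + v ≤ m)) :
    coinStep m (s, L) v = (s, L) := by
  simp only [coinStep]
  by_cases hc : 0 < v ∧ v < m
  · have hk : (m - s) / v ≤ 0 := by
      have h4 : (m - s) / v < 1 := by rw [Int.ediv_lt_iff_lt_mul hc.1]; omega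
      omega
    rw [if_pos hc, if_neg (show ¬ (0 < PySem.Int.floordiv (m - s) v) by
      rw [PySem.Int.floordiv_eq_ediv_of_pos hc.1]; omega)]
  · rw [if_neg hc]

-- Loop/fold correspondence on an arbitrary coin list satisfying Pre_.
lemma loop_eq (c : List Int) (m : Int) (H : ∀ x ∈ c, x < m → 0 < x) :
    ∀ (f idx : Nat) (cl : List Int), idx ≤ c.length →
      idx + (m - cl.sum).toNat + 1 ≤ f →
      ((coinExchangeLoop c m f idx cl).length : Int)
        = ((c.take idx).reverse.foldl (coinStep m) (cl.sum, (cl.length : Int))).2 := by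
  intro f
  induction f with
  | zero => intro idx cl _ hf; omega
  | succ f ih =>
    intro idx cl hidx hf
    cases idx with
    | zero => simp [coinExchangeLoop]
    | succ n =>
      have hn : n < c.length := by omega
      have hget : (PySem.List.pyGet? c ((((n + 1 : Nat)) : Int) - 1)).getD 0 = (getElem c n hn) := by
        have hc1 : (((n + 1 : Nat)) : Int) - 1 = ((n : Nat) : Int) := by push_cast; ring
        rw [hc1, PySem.List.pyGet?_natCast, List.getElem?_eq_getElem hn, Option.getD_some]
      have hvmem : (getElem c n hn) ∈ c := List.getElem_mem hn
      have htake : (c.take (n + 1)).reverse = (getElem c n hn) :: (c.take n).reverse := by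
        rw [List.take_add_one, List.getElem?_eq_getElem hn]
        simp
      rw [coinExchangeLoop, if_neg (Nat.succ_ne_zero n)]
      simp only [hget]
      by_cases hcond : m > (getElem c n hn) ∧ cl.sum + (getElem c n hn) ≤ m
      · rw [if_pos hcond]
        have hv : 0 < (getElem c n hn) := H (getElem c n hn) hvmem (by omega)
        have hih := ih (n + 1) (cl ++ [(getElem c n hn)]) hidx (by
          simp only [List.sum_append, List.sum_cons, List.sum_nil, add_zero]
          omega)
        rw [hih]
        simp only [List.sum_append, List.sum_cons, List.sum_nil, add_zero,
          List.length_append, List.length_cons, List.length_nil, htake, List.foldl_cons]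
        have hcast : ((cl.length + (0 + 1) : Nat) : Int) = (cl.length : Int) + 1 := by
          push_cast; ring
        rw [hcast, ← coinStep_absorb m cl.sum (cl.length : Int) (getElem c n hn) hv (by omega) hcond.2]
      · rw [if_neg hcond]
        have hih := ih n cl (by omega) (by omega)
        rw [Nat.succ_sub_one, hih, htake, List.foldl_cons,
          coinStep_skip m cl.sum (cl.length : Int) (getElem c n hn) hcond]

-- Python's sorted(c, reverse=True) on Ints is the reverse of sorted(c).
lemma sorted_rev_eq_reverse (c : List Int) :
    PySem.List.sorted c (fun x => x) true = (PySem.List.sorted c (fun x => x) false).reverse := by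
  have hperm : (PySem.List.sorted c (fun x => x) true).Perm
      ((PySem.List.sorted c (fun x => x) false).reverse) :=
    (PySem.List.sorted_perm c (fun x => x) true).trans
      ((PySem.List.sorted_perm c (fun x => x) false).symm.trans (List.reverse_perm _).symm)
  refine hperm.eq_of_pairwise (le := fun a b : Int => b ≤ a) ?_ ?_ ?_
  · exact fun a b _ _ h1 h2 => le_antisymm h2 h1
  · simpa using PySem.List.sorted_pairwise_rev c (fun x => x)
  · rw [List.pairwise_reverse]
    simpa using PySem.List.sorted_pairwise c (fun x => x)

-- ===== VERDICT (by name: the statement is the Claim_ definition above) =====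
theorem coinExchange_spec : Claim_equal_coinExchange := by
  intro c m _ hpre
  unfold Spec_coinExchange coinExchange coinExchange_alt
  have hmem : ∀ x ∈ PySem.List.sorted c (fun x => x) false, x < m → 0 < x := by
    intro x hx; exact hpre x ((PySem.List.mem_sorted _ _ _ _).1 hx)
  have hlen : (PySem.List.sorted c (fun x => x) false).length = c.length :=
    PySem.List.length_sorted c (fun x => x) false
  have h := loop_eq (PySem.List.sorted c (fun x => x) false) m hmem
    (c.length + m.toNat + 1) c.length [] (le_of_eq hlen.symm)
    (by simp only [List.sum_nil, Int.sub_zero]; omega)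
  simp only [List.sum_nil, List.length_nil, Nat.cast_zero] at h
  rw [h, ← hlen, List.take_length, sorted_rev_eq_reverse]
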